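-- pv_equiv track=rewrite | github.com/ryusuke920/CompetitiveProgramming | AtCoder/OtherContest/CODEFESTIVAL2014決勝/C.py | keta
-- ===== SOURCE A (Python) =====
-- def keta(n):
--     i = 0
--     ans = 0
--     num = n
--     while n > 0:
--         ans += num**i * (n%10)
--         i += 1
--         n //= 10
--     return ans
-- ===== SOURCE B (Python) =====
-- def keta(n):
--     def horner(m):
--         if m <= 0:
--             return 0
--         q, r = divmod(m, 10)
--         return horner(q) * n + r
--     return horner(n)
-- ===== Notes on version B (the rewrite author's own statement) =====
-- stated objective: alternative
-- what changed: B evaluates the digit polynomial by top-down recursive Horner using divmod (value(m) = value(m//10)*n + m%10), with no counter, no accumulator and no explicit powers, instead of A's iterative loop summing num**i * digit.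
import Mathlib
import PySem

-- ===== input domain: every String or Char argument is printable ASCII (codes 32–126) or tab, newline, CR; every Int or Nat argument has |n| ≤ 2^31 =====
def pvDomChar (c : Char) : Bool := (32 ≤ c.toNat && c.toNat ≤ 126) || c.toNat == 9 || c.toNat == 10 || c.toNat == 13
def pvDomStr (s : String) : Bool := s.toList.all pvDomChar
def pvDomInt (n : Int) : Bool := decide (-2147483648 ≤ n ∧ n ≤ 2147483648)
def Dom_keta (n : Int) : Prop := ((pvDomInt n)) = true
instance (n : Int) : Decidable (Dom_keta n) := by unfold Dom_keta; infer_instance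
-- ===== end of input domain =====

-- B evaluates the digit polynomial by top-down recursive Horner via divmod (no counter, no powers); same return value everywhere.

-- ===== PORT A =====
-- while n > 0: ans += num**i * (n%10); i += 1; n //= 10
def ketaLoop (num n : Int) (i : Nat) (ans : Int) : Int :=
  if h : n > 0 then
    ketaLoop num (PySem.Int.floordiv n 10) (i + 1) (ans + num ^ i * PySem.Int.mod n 10)
  else ans
termination_by n.toNat
decreasing_by
  rw [PySem.Int.floordiv_eq_ediv_of_pos (by norm_num : (0:Int) < 10)]
  omega

def keta (n : Int) : Int := ketaLoop n n 0 0

-- ===== PORT B =====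
-- def horner(m): if m <= 0: return 0; q, r = divmod(m, 10); return horner(q) * n + r
def hornerB (num m : Int) : Int :=
  if h : m ≤ 0 then 0
  else
    let qr := (PySem.Int.divmod? m 10).getD (0, 0)
    hornerB num qr.1 * num + qr.2
termination_by m.toNat
decreasing_by
  simp only [PySem.Int.divmod?, if_neg (by norm_num : (10:Int) ≠ 0), Option.getD_some,
    Int.fdiv_eq_ediv_of_nonneg _ (by norm_num : (0:Int) ≤ 10)]
  omega

def keta_alt (n : Int) : Int := hornerB n n

-- ===== PRECONDITION & SPEC =====
def Spec_keta (n : Int) (out : Int) : Prop := out = keta_alt n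
instance (n : Int) (out : Int) : Decidable (Spec_keta n out) := by unfold Spec_keta; infer_instance

-- ===== CLAIM (what is proved, stated in full; the proofs are below) =====
def Claim_equal_keta : Prop := ∀ (n : Int), Dom_keta n → Spec_keta n (keta n)

-- ===== LEMMAS AND PROOFS =====

theorem hornerB_nonpos (num m : Int) (h : m ≤ 0) : hornerB num m = 0 := by
  rw [hornerB]; simp [h]

theorem hornerB_pos (num m : Int) (h : ¬ m ≤ 0) :
    hornerB num m = hornerB num (PySem.Int.floordiv m 10) * num + PySem.Int.mod m 10 := by
  conv_lhs => rw [hornerB]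
  simp [h, PySem.Int.divmod?, PySem.Int.floordiv, PySem.Int.mod]

theorem ketaLoop_eq_hornerB (num : Int) (k : Nat) : ∀ (n : Int), n.toNat ≤ k →
    ∀ (i : Nat) (ans : Int), ketaLoop num n i ans = ans + num ^ i * hornerB num n := by
  induction k with
  | zero =>
    intro n hn i ans
    have h : ¬ n > 0 := by omega
    rw [ketaLoop, hornerB_nonpos num n (by omega)]
    simp [h]
  | succ k ih =>
    intro n hn i ans
    by_cases h : n > 0
    · have hlt : (PySem.Int.floordiv n 10).toNat ≤ k := by
        rw [PySem.Int.floordiv_eq_ediv_of_pos (by norm_num : (0:Int) < 10)]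
        omega
      rw [ketaLoop]
      simp only [h, dif_pos]
      rw [ih _ hlt, hornerB_pos num n (by omega)]
      ring
    · rw [ketaLoop, hornerB_nonpos num n (by omega)]
      simp [h]

-- ===== VERDICT (by name: the statement is the Claim_ definition above) =====
theorem keta_spec : Claim_equal_keta := by
  intro n _
  unfold Spec_keta keta keta_alt
  rw [ketaLoop_eq_hornerB n n.toNat n le_rfl]
  simp
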